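-- pv_equiv track=rewrite | github.com/ngna3007/sentinelai-audit-framework | data_pipeline/processors/aws_guidance/core/content_processor.py | group_by_pci_control
-- ===== SOURCE A (Python) =====
-- from typing import Dict, List, Any, Optional
--
-- def group_by_pci_control(mappings: List[Dict[str, Any]]) -> Dict[str, List[Dict[str, Any]]]:
--     """Group mappings by PCI DSS control ID."""
--     grouped = {}
--     for mapping in mappings:
--         control_id = mapping['control_id']
--         if control_id not in grouped:
--             grouped[control_id] = []
--         grouped[control_id].append(mapping)
--     return grouped
-- ===== SOURCE B (Python) =====
-- from typing import Dict, List, Any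
--
-- def group_by_pci_control(mappings: List[Dict[str, Any]]) -> Dict[str, List[Dict[str, Any]]]:
--     """Group mappings by PCI DSS control ID: collect the distinct control ids
--     in first-occurrence order, then gather each group with one filter pass."""
--     keys = list(dict.fromkeys(m['control_id'] for m in mappings))
--     return {k: [m for m in mappings if m['control_id'] == k] for k in keys}
-- ===== Notes on version B (the rewrite author's own statement) =====
-- stated objective: alternative
-- what changed: A groups in one pass by conditional hash insertion and per-key append; B instead collects the distinct control_ids in first-occurrence order with dict.fromkeys and then builds each group with a separate filter pass over the whole list.
import Mathlib
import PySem

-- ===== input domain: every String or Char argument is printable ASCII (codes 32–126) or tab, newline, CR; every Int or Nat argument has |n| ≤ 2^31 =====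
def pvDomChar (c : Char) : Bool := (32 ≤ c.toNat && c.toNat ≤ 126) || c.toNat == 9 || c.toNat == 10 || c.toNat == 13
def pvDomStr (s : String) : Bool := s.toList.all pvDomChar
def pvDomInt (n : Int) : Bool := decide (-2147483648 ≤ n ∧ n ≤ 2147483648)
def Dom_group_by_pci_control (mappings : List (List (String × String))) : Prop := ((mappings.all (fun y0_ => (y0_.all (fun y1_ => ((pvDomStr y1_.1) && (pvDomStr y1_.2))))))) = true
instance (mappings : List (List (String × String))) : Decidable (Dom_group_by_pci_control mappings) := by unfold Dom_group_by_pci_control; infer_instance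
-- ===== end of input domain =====

-- B replaces A's single-pass hash-insertion grouping by an ordered-dedup of the keys followed by
-- one filter pass per distinct key (same dict, different decomposition; not claimed faster).


-- ===== PORT A =====
-- shared accessor: mapping['control_id'] (dict lookup = first match; '' only outside Pre_, where Python raises KeyError)
def pvCid (m : List (String × String)) : String :=
  ((PySem.Dict.mk m).get? "control_id").getD ""

def group_by_pci_control (mappings : List (List (String × String))) : List (String × List (List (String × String))) :=
  (mappings.foldl
    (fun grouped mapping =>
      let control_id := pvCid mapping
      let grouped := if grouped.contains control_id then grouped else grouped.insert control_id []
      grouped.modify control_id [] (fun l => l ++ [mapping]))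
    PySem.Dict.empty).items

-- ===== PORT B =====
def group_by_pci_control_alt (mappings : List (List (String × String))) : List (String × List (List (String × String))) :=
  let keys := PySem.List.dedup (mappings.map pvCid)
  keys.map (fun k => (k, mappings.filter (fun m => pvCid m == k)))

-- ===== PRECONDITION & SPEC =====
-- Pre_ excludes mappings missing the 'control_id' key, on which the Python A raises KeyError (B raises too).
def Pre_group_by_pci_control (mappings : List (List (String × String))) : Prop :=
  ∀ m ∈ mappings, "control_id" ∈ m.map Prod.fst
instance (mappings : List (List (String × String))) : Decidable (Pre_group_by_pci_control mappings) := by unfold Pre_group_by_pci_control; infer_instance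

def pvWitness_group_by_pci_control : (List (List (String × String))) :=
  [[("control_id", "1.1"), ("x", "a")], [("control_id", "2.3")], [("control_id", "1.1"), ("y", "b")]]

def Spec_group_by_pci_control (mappings : List (List (String × String))) (out : List (String × List (List (String × String)))) : Prop := out = group_by_pci_control_alt mappings
instance (mappings : List (List (String × String))) (out : List (String × List (List (String × String)))) : Decidable (Spec_group_by_pci_control mappings out) := by unfold Spec_group_by_pci_control; infer_instance

-- ===== CLAIM (what is proved, stated in full; the proofs are below) =====
def Claim_equal_group_by_pci_control : Prop := ∀ (mappings : List (List (String × String))), Dom_group_by_pci_control mappings → Pre_group_by_pci_control mappings → Spec_group_by_pci_control mappings (group_by_pci_control mappings)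

-- ===== LEMMAS AND PROOFS =====

-- A's 'if k not in d: d[k] = []' followed by append is exactly one modify with default [].
theorem pv_step_eq (d : PySem.Dict String (List (List (String × String)))) (k : String)
    (f : List (List (String × String)) → List (List (String × String))) :
    (if d.contains k then d else d.insert k []).modify k [] f = d.modify k [] f := by
  split_ifs with h
  · rfl
  · have hg : d.getD k [] = [] := PySem.Dict.getD_of_not_contains d [] (by simp_all)
    simp only [PySem.Dict.modify, PySem.Dict.getD_insert_self, PySem.Dict.insert_insert_self, hg]

theorem group_by_pci_control_spec : Claim_equal_group_by_pci_control := by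
  intro mappings _ _
  unfold Spec_group_by_pci_control group_by_pci_control group_by_pci_control_alt
  have hfold : mappings.foldl
      (fun grouped mapping =>
        let control_id := pvCid mapping
        let grouped := if grouped.contains control_id then grouped else grouped.insert control_id []
        grouped.modify control_id [] (fun l => l ++ [mapping]))
      PySem.Dict.empty
      = mappings.foldl (fun d m => d.modify (pvCid m) [] (fun l => l ++ [m])) PySem.Dict.empty := by
    simp only [pv_step_eq]
  rw [hfold]
  set D := mappings.foldl (fun d m => d.modify (pvCid m) [] (fun l => l ++ [m])) PySem.Dict.empty with hD
  have hnd : D.keys.Nodup := by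
    rw [hD]
    exact PySem.Dict.nodup_keys_foldl_modify_key mappings pvCid [] _ PySem.Dict.empty
      (by simp [PySem.Dict.keys_empty])
  have hkeys : D.keys = PySem.List.dedup (mappings.map pvCid) := by
    rw [hD, PySem.Dict.keys_foldl_modify_key, PySem.List.dedup_eq_ofList]
    simp [PySem.Dict.keys_empty, PySem.Set.update_nil_left]
  have hgetD : ∀ c, D.getD c [] = mappings.filter (fun m => pvCid m == c) := by
    intro c
    have hmap : D = List.foldl
        (fun (d : PySem.Dict String (List (List (String × String)))) p => d.modify p.1 [] (fun l => l ++ [p.2]))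
        PySem.Dict.empty (mappings.map (fun m => (pvCid m, m))) := by
      rw [hD, List.foldl_map]
    rw [hmap, PySem.Dict.getD_foldl_modify_append]
    simp [List.filter_map, Function.comp_def]
  rw [PySem.Dict.items_eq_map_keys D hnd [], hkeys]
  exact List.map_congr_left (fun k _ => by rw [hgetD k])
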